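-- pv_equiv track=rewrite | github.com/vbaaccess/pyParsing | pyHotShot.py | get_matching_keywords
-- ===== SOURCE A (Python) =====
-- from typing import Set, Tuple
--
-- def get_matching_keywords(name: str, keywords: Set[str]) -> Set[str]:
--     """
--     Function that checks if any of the keywords are present in the given string.
--     Example:
--     >>> get_matching_keywords("ASUS TUF GAMING Z590-PLUS\xa0(Socket 1200)", {"Grafika", "GAMING", "ASUS"})
--     {'ASUS'}
--     """
--     words = set(name.split(' '))
--
--     matching_keywords = set()
--     for k_lower in set([k.lower() for k in keywords]):
--         for w_lower in set([w.lower() for w in words]):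
--             if k_lower in w_lower:
--                 matching_keywords.add(k_lower)
--
--     return matching_keywords
-- ===== SOURCE B (Python) =====
-- def get_matching_keywords(name, keywords):
--     # Lowercase once, then index every substring of the words whose length is
--     # the length of some keyword, and answer with one set intersection.
--     kws = {k.lower() for k in keywords}
--     lens = {len(k) for k in kws}
--     words = {w.lower() for w in name.split(' ')}
--     subs = set()
--     for w in words:
--         for L in lens:
--             for i in range(len(w) - L + 1):
--                 subs.add(w[i:i + L])
--     return kws & subs
-- ===== Notes on version B (the rewrite author's own statement) =====
-- stated objective: faster
-- what changed: B lowercases once, precomputes a single set of all word substrings whose length is a keyword length, and returns one set intersection with the lowercased keywords, removing A's per-keyword rescans of every word.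
import Mathlib
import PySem

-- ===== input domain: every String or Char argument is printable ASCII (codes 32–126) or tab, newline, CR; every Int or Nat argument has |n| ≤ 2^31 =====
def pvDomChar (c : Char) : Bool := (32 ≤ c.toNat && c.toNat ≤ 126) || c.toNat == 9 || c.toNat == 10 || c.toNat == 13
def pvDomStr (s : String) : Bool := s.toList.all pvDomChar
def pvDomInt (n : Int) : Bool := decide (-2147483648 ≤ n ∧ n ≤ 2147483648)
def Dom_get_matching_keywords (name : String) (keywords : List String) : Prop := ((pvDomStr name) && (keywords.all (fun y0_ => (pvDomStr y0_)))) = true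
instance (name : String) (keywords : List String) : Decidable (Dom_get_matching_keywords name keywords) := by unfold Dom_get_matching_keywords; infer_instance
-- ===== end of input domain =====

-- B replaces A's nested per-keyword/per-word substring scans by one precomputed
-- set of keyword-length substrings of the lowercased words plus a single set
-- intersection (measurably faster in a timing run; return value proved identical).

-- ===== PORT A =====
def get_matching_keywords (name : String) (keywords : List String) : List String :=
  -- words = set(name.split(' '))
  let words : PySem.Set String := PySem.Set.ofList ((PySem.Str.split? name " ").getD [])
  -- for k_lower in set([k.lower() for k in keywords]): for w_lower in set([w.lower() for w in words]): …
  (PySem.Set.ofList (keywords.map PySem.Str.lower)).foldl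
    (fun m k =>
      (PySem.Set.ofList (words.map PySem.Str.lower)).foldl
        (fun m2 w => if PySem.Str.isIn k w then PySem.Set.add m2 k else m2) m)
    PySem.Set.empty

-- ===== PORT B =====
-- substrings w[i:i+L] for i in range(len(w) - L + 1)  (B's innermost loop)
def pySubstringsLen (w : String) (L : Int) : List String :=
  (PySem.List.pyRange 0 ((PySem.Str.len w : Int) - L + 1) 1).map (fun i =>
    PySem.Str.slice w (some i) (some (i + L)))

def get_matching_keywords_alt (name : String) (keywords : List String) : List String :=
  -- kws = {k.lower() for k in keywords};  lens = {len(k) for k in kws}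
  let kws : PySem.Set String := PySem.Set.ofList (keywords.map PySem.Str.lower)
  let lens : PySem.Set Int := PySem.Set.ofList (kws.map (fun k => (PySem.Str.len k : Int)))
  -- words = {w.lower() for w in name.split(' ')}
  let words : PySem.Set String :=
    PySem.Set.ofList (((PySem.Str.split? name " ").getD []).map PySem.Str.lower)
  -- subs = {w[i:i+L] for w in words for L in lens for i in range(len(w)-L+1)}
  let subs : PySem.Set String :=
    PySem.Set.ofList (words.flatMap (fun w => lens.flatMap (fun L => pySubstringsLen w L)))
  -- kws & subs
  PySem.Set.inter kws subs

-- ===== PRECONDITION & SPEC =====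
def Spec_get_matching_keywords (name : String) (keywords : List String) (out : List String) : Prop := out = get_matching_keywords_alt name keywords
instance (name : String) (keywords : List String) (out : List String) : Decidable (Spec_get_matching_keywords name keywords out) := by unfold Spec_get_matching_keywords; infer_instance

-- ===== CLAIM (what is proved, stated in full; the proofs are below) =====
def Claim_equal_get_matching_keywords : Prop := ∀ (name : String) (keywords : List String), Dom_get_matching_keywords name keywords → Spec_get_matching_keywords name keywords (get_matching_keywords name keywords)

-- ===== LEMMAS AND PROOFS =====

theorem add_of_mem (m : PySem.Set String) (k : String) (h : k ∈ m) : PySem.Set.add m k = m := by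
  simp [PySem.Set.add, PySem.Set.contains, h]

theorem add_of_not_mem (m : PySem.Set String) (k : String) (h : k ∉ m) : PySem.Set.add m k = m ++ [k] := by
  simp [PySem.Set.add, PySem.Set.contains, h]

theorem mem_add_self (m : PySem.Set String) (k : String) : k ∈ PySem.Set.add m k := by
  by_cases h : k ∈ m
  · rw [add_of_mem m k h]; exact h
  · rw [add_of_not_mem m k h]; simp

-- A's inner loop does not change an accumulator that already holds k
theorem fold_stay (k : String) (l : List String) (m : PySem.Set String) (h : k ∈ m) :
    l.foldl (fun m2 w => if PySem.Str.isIn k w then PySem.Set.add m2 k else m2) m = m := by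
  induction l with
  | nil => rfl
  | cons w t ih =>
    simp only [List.foldl_cons]
    split_ifs with hw
    · rw [add_of_mem m k h]; exact ih
    · exact ih

-- A's inner loop over the word set: add k iff some word matches
theorem inner_fold (k : String) (l : List String) (m : PySem.Set String) :
    l.foldl (fun m2 w => if PySem.Str.isIn k w then PySem.Set.add m2 k else m2) m
      = if l.any (fun w => PySem.Str.isIn k w) then PySem.Set.add m k else m := by
  induction l generalizing m with
  | nil => simp
  | cons w t ih =>
    simp only [List.foldl_cons, List.any_cons]
    by_cases hw : PySem.Str.isIn k w = true
    · simp only [hw, if_true, Bool.true_or]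
      rw [fold_stay k t _ (mem_add_self m k)]
    · simp only [hw, Bool.false_or]
      exact ih m

-- A's outer loop is a filter when the iterated list is nodup and fresh w.r.t. the accumulator
theorem outer_fold (p : String → Bool) (l : List String) (m : PySem.Set String)
    (hnd : l.Nodup) (hm : ∀ x ∈ l, x ∉ m) :
    l.foldl (fun m k => if p k then PySem.Set.add m k else m) m = m ++ l.filter p := by
  induction l generalizing m with
  | nil => simp
  | cons k t ih =>
    simp only [List.foldl_cons, List.filter_cons]
    rcases List.nodup_cons.mp hnd with ⟨hkt, hnt⟩
    have hkm : k ∉ m := hm k (by simp)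
    split_ifs with hp
    · rw [add_of_not_mem m k hkm, ih _ hnt ?_]
      · simp
      · intro x hx hmem
        rcases List.mem_append.mp hmem with h1 | h2
        · exact hm x (by simp [hx]) h1
        · simp at h2; subst h2; exact hkt hx
    · rw [ih _ hnt (fun x hx => hm x (by simp [hx]))]

-- any member of a substring list is an infix of the word
theorem infix_of_mem_pySubstringsLen (k w : String) (L : Int) (hL : 0 ≤ L)
    (h : k ∈ pySubstringsLen w L) : PySem.Str.isIn k w = true := by
  rw [PySem.Str.isIn_iff_infix]
  unfold pySubstringsLen at h
  simp only [List.mem_map, PySem.List.mem_pyRange_one] at h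
  rcases h with ⟨i, ⟨hi0, hilt⟩, rfl⟩
  have hs : (PySem.Str.slice w (some i) (some (i + L))).toList
      = (w.toList.drop i.toNat).take ((i + L).toNat - i.toNat) := by
    simp only [pysem]
    exact PySem.List.slice_toNat _ hi0 (by omega)
  rw [List.infix_iff_prefix_suffix]
  exact ⟨w.toList.drop i.toNat, by rw [hs]; exact List.take_prefix _ _, List.drop_suffix _ _⟩

-- every infix of w of length L = len k appears in the substring list for L
theorem mem_pySubstringsLen_of_infix (k w : String)
    (h : k.toList <:+: w.toList) : k ∈ pySubstringsLen w (PySem.Str.len k : Int) := by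
  rcases h with ⟨t, r, htr⟩
  have hlenw : PySem.Str.len w = t.length + k.toList.length + r.length := by
    simp [pysem, ← htr]; ring
  have hlenk : (PySem.Str.len k : Int) = (k.toList.length : Int) := by simp [pysem]
  unfold pySubstringsLen
  simp only [List.mem_map, PySem.List.mem_pyRange_one]
  refine ⟨(t.length : Int), ⟨by positivity, by rw [hlenw, hlenk]; omega⟩, ?_⟩
  apply String.toList_inj.mp
  have : PySem.List.slice w.toList (some (t.length : Int)) (some ((t.length : Int) + (k.toList.length : Int))) = k.toList := by
    rw [PySem.List.slice_natCast_add, ← htr, List.append_assoc, List.drop_left, List.take_left]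
  rw [hlenk]
  simpa [pysem] using this

-- ===== VERDICT (by name: the statement is the Claim_ definition above) =====
theorem get_matching_keywords_spec : Claim_equal_get_matching_keywords := by
  intro name keywords _
  unfold Spec_get_matching_keywords get_matching_keywords get_matching_keywords_alt
  simp only []
  rw [show (fun (m : PySem.Set String) k =>
        (PySem.Set.ofList ((PySem.Set.ofList ((PySem.Str.split? name " ").getD [])).map PySem.Str.lower)).foldl
          (fun m2 w => if PySem.Str.isIn k w then PySem.Set.add m2 k else m2) m)
      = (fun (m : PySem.Set String) k =>
          if (PySem.Set.ofList ((PySem.Set.ofList ((PySem.Str.split? name " ").getD [])).map PySem.Str.lower)).any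
              (fun w => PySem.Str.isIn k w) then PySem.Set.add m k else m) from
      funext fun m => funext fun k => inner_fold k _ m]
  rw [outer_fold _ _ PySem.Set.empty (PySem.Set.nodup_ofList _) (by intro x _ h; exact absurd h (List.not_mem_nil))]
  show List.filter _ _ = PySem.Set.inter _ _
  rw [show ∀ (a b : PySem.Set String), PySem.Set.inter a b = a.filter (fun x => PySem.Set.contains b x) from fun a b => rfl]
  apply List.filter_congr
  intro k hk
  have hk' : ∃ kw ∈ keywords, PySem.Str.lower kw = k := by
    simpa [PySem.Set.mem_ofList, List.mem_map] using hk
  rw [Bool.eq_iff_iff]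
  simp only [List.any_eq_true, PySem.Set.contains, List.contains_iff_mem, PySem.Set.mem_ofList,
    List.mem_map, List.mem_flatMap]
  constructor
  · rintro ⟨w, hw, hin⟩
    rw [PySem.Str.isIn_iff_infix] at hin
    exact ⟨w, hw, (PySem.Str.len k : Int), ⟨k, hk', rfl⟩,
      mem_pySubstringsLen_of_infix k w hin⟩
  · rintro ⟨w, hw, L, hL, hin⟩
    refine ⟨w, hw, infix_of_mem_pySubstringsLen k w L ?_ hin⟩
    rcases hL with ⟨k', _, rfl⟩
    exact Int.natCast_nonneg _
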